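-- pv_equiv track=rewrite | github.com/XinyiYS/Algorithm-Practices | codeforces/wavynumbers.py | iswavy
-- ===== SOURCE A (Python) =====
-- def iswavy(number):
--     str_number = str(number)
--     if len(str_number) <=2:
--         return True
--     diff = int(str_number[0]) - int(str_number[1])
--     for i,c in enumerate(str_number[1 : len(str_number)-1]):
--         diff_ = (int(c) - int(str_number[i + 2]))
--         if (diff_ * diff) >= 0:
--             return False
--         diff = diff_
--
--     return True
-- ===== SOURCE B (Python) =====
-- def iswavy(number):
--     s = str(number)
--     if len(s) <= 2:
--         return True
--     digits = [int(c) for c in s]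
--     signs = [(a > b) - (a < b) for a, b in zip(digits, digits[1:])]
--     if 0 in signs:
--         return False
--     return all(p != q for p, q in zip(signs, signs[1:]))
-- ===== Notes on version B (the rewrite author's own statement) =====
-- stated objective: alternative
-- what changed: Replaces the running-difference accumulator with early return by a materialised adjacent-pair sign table followed by a separate zero-check and alternation scan.
import Mathlib
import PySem

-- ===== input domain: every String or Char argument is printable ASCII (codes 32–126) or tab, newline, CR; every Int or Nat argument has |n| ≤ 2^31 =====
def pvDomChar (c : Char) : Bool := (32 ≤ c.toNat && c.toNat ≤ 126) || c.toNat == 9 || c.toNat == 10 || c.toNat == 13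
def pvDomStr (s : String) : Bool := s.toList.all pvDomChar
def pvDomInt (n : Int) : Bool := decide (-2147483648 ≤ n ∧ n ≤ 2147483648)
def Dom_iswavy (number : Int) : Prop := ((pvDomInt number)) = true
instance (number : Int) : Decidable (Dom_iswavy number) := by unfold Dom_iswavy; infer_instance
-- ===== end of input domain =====

-- B replaces A's running-difference accumulator with a materialised sign table plus a
-- separate zero/alternation scan (objective: alternative decomposition, same cost).

-- int(c) for a single character c; inside Pre_ every character is a digit, so the
-- default 0 (Python: ValueError) is never reached.
def charInt (c : Char) : Int := (PySem.Int.ofStr? (String.mk [c])).getD 0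

-- ===== PORT A =====
-- the for-loop of A: `for i, c in enumerate(mid): …` with early return
def iswavyGo (cs : List Char) (mid : List Char) (i : Int) (diff : Int) : Bool :=
  match mid with
  | [] => true
  | c :: rest =>
      if (charInt c - charInt ((PySem.List.pyGet? cs (i + 2)).getD ' ')) * diff ≥ 0 then false
      else iswavyGo cs rest (i + 1) (charInt c - charInt ((PySem.List.pyGet? cs (i + 2)).getD ' '))

def iswavy (number : Int) : Bool :=
  let s := PySem.Int.toChars number
  if s.length ≤ 2 then true
  else
    let diff := charInt ((PySem.List.pyGet? s 0).getD ' ')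
               - charInt ((PySem.List.pyGet? s 1).getD ' ')
    iswavyGo s (PySem.List.slice s (some 1) (some ((s.length : Int) - 1))) 0 diff

-- ===== PORT B =====
-- (a > b) - (a < b)
def signE (a b : Int) : Int := (if a > b then 1 else 0) - (if a < b then 1 else 0)

-- `if 0 in signs: return False` then `all(p != q for p, q in zip(signs, signs[1:]))`
def bcheck (signs : List Int) : Bool :=
  if signs.contains 0 then false
  else (signs.zip signs.tail).all (fun p => p.1 != p.2)

def iswavy_alt (number : Int) : Bool :=
  let s := PySem.Int.toChars number
  if s.length ≤ 2 then true
  else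
    let digits := s.map charInt
    let signs := (digits.zip digits.tail).map (fun p => signE p.1 p.2)
    bcheck signs

-- ===== PRECONDITION & SPEC =====
-- Pre_ excludes negative numbers of more than one digit: their decimal string starts
-- with '-' and is longer than two characters, so both A and B raise ValueError at int('-').
def Pre_iswavy (number : Int) : Prop := -9 ≤ number
instance (number : Int) : Decidable (Pre_iswavy number) := by unfold Pre_iswavy; infer_instance
def pvWitness_iswavy : Int := 154

def Spec_iswavy (number : Int) (out : Bool) : Prop := out = iswavy_alt number
instance (number : Int) (out : Bool) : Decidable (Spec_iswavy number out) := by unfold Spec_iswavy; infer_instance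

-- ===== CLAIM (what is proved, stated in full; the proofs are below) =====
def Claim_equal_iswavy : Prop := ∀ (number : Int), Dom_iswavy number → Pre_iswavy number → Spec_iswavy number (iswavy number)

-- ===== LEMMAS AND PROOFS =====

def sgn (z : Int) : Int := if 0 < z then 1 else if z < 0 then -1 else 0

-- adjacent differences of the digit values of a character list
def diffsOfC (l : List Char) : List Int :=
  (l.zip l.tail).map (fun p => charInt p.1 - charInt p.2)

-- abstract form of A's loop over the list of adjacent differences
def acore (d : Int) (xs : List Int) : Bool :=
  match xs with
  | [] => true
  | x :: xs => if x * d ≥ 0 then false else acore x xs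

lemma signE_eq_sgn (a b : Int) : signE a b = sgn (a - b) := by
  unfold signE sgn; split_ifs <;> omega

lemma prodneg (x d : Int) :
    x * d < 0 ↔ (sgn d ≠ 0 ∧ sgn x ≠ 0 ∧ sgn d ≠ sgn x) := by
  rw [mul_neg_iff]
  unfold sgn; split_ifs <;> constructor <;> intro h <;> simp_all <;> omega

lemma bcheck_cons (s0 s1 : Int) (t : List Int) :
    bcheck (s0 :: s1 :: t) = (((s0 != 0) && (s0 != s1)) && bcheck (s1 :: t)) := by
  unfold bcheck
  by_cases h0 : s0 = 0
  · simp [h0]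
  · have h0' : (0 : Int) ≠ s0 := Ne.symm h0
    by_cases hc : (s1 :: t).contains 0
    · simp [List.contains_cons] at hc
      rcases hc with hc | hc
      · simp [hc]
      · simp [List.contains_cons, hc, h0, h0']
    · simp only [List.contains_cons] at hc ⊢
      simp only [Bool.or_eq_true, not_or] at hc
      obtain ⟨h1, h2⟩ := hc
      simp only [h1, h2, Bool.or_false, Bool.false_or] at *
      simp [h0', Bool.and_assoc, beq_eq_false_iff_ne] at *
      simp_all [Bool.and_left_comm, Bool.and_comm]

lemma core (xs : List Int) : ∀ (d : Int), xs ≠ [] →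
    acore d xs = bcheck ((d :: xs).map sgn) := by
  induction xs with
  | nil => intro d h; exact absurd rfl h
  | cons x rest IH =>
    intro d _
    cases rest with
    | nil =>
      by_cases h : x * d ≥ 0
      · have h2 : ¬ x * d < 0 := by omega
        rw [prodneg] at h2
        push_neg at h2
        simp only [acore, List.map, if_pos h, bcheck, List.contains_cons]
        by_cases hd : sgn d = 0
        · simp [hd]
        · by_cases hx : sgn x = 0
          · simp [hx]
          · have hfact := h2 hd hx
            have hd' : (0 : Int) ≠ sgn d := Ne.symm hd
            have hx' : (0 : Int) ≠ sgn x := Ne.symm hx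
            simp [hfact, hd', hx']
      · have h2 : x * d < 0 := by omega
        rw [prodneg] at h2
        obtain ⟨hd, hx, hne⟩ := h2
        have hd' : (0 : Int) ≠ sgn d := Ne.symm hd
        have hx' : (0 : Int) ≠ sgn x := Ne.symm hx
        simp [acore, if_neg h, bcheck, hd', hx', hne]
    | cons y ys =>
      have IH' := IH x (by simp)
      simp only [List.map] at IH' ⊢
      rw [bcheck_cons, ← IH']
      by_cases h : x * d ≥ 0
      · have h2 : ¬ x * d < 0 := by omega
        rw [prodneg] at h2
        push_neg at h2
        simp only [acore, if_pos h]
        by_cases hd : sgn d = 0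
        · simp [hd]
        · by_cases hx : sgn x = 0
          · have hx0 : x = 0 := by unfold sgn at hx; split_ifs at hx <;> omega
            simp [acore, hx0]
          · have := h2 hd hx
            simp [this]
      · have h2 : x * d < 0 := by omega
        rw [prodneg] at h2
        obtain ⟨hd, hx, hne⟩ := h2
        simp only [acore, if_neg h]
        simp [hd, hne]

lemma diffs_cons (a b : Char) (t : List Char) :
    diffsOfC (a :: b :: t) = (charInt a - charInt b) :: diffsOfC (b :: t) := by
  simp [diffsOfC]

lemma go_eq (cs : List Char) (mid : List Char) : ∀ (k : Nat) (last : Char) (d : Int),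
    cs.drop (k + 1) = mid ++ [last] →
    iswavyGo cs mid (k : Int) d = acore d (diffsOfC (mid ++ [last])) := by
  induction mid with
  | nil => intro k last d _; simp [iswavyGo, diffsOfC, acore]
  | cons c rest IH =>
    intro k last d h
    have hdrop : cs.drop (k + 2) = rest ++ [last] := by
      have h12 : cs.drop (k + 2) = (cs.drop (k + 1)).drop 1 := by
        rw [List.drop_drop]
      rw [h12, h]; simp
    have hget : PySem.List.pyGet? cs ((k : Int) + 2) = (rest ++ [last])[0]? := by
      have hc : ((k : Int) + 2) = ((k + 2 : Nat) : Int) := by push_cast; ring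
      rw [hc, PySem.List.pyGet?_natCast, ← hdrop, List.getElem?_drop]
    have hcast : (k : Int) + 1 = ((k + 1 : Nat) : Int) := by push_cast; ring
    cases rest with
    | nil =>
      simp only [List.nil_append] at hget hdrop ⊢
      simp only [List.getElem?_cons_zero] at hget
      rw [iswavyGo, hget]
      simp [iswavyGo, diffsOfC, acore]
    | cons r rs =>
      have IH' := IH (k + 1) last (charInt c - charInt r) hdrop
      simp only [List.cons_append, List.getElem?_cons_zero] at hget
      have hstep : (c :: r :: rs) ++ [last] = c :: r :: (rs ++ [last]) := by simp
      rw [hstep, diffs_cons, iswavyGo, hget]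
      simp only [Option.getD_some]
      rw [acore.eq_def]
      simp only []
      rw [hcast]
      split_ifs with hp
      · rfl
      · exact IH'

lemma signs_eq (l : List Char) :
    ((l.map charInt).zip (l.map charInt).tail).map (fun p => signE p.1 p.2)
      = (diffsOfC l).map sgn := by
  induction l with
  | nil => simp [diffsOfC]
  | cons a t IH =>
    cases t with
    | nil => simp [diffsOfC]
    | cons b t' =>
      simp only [List.map, List.tail, List.zip, List.zipWith] at IH ⊢
      simp only [diffsOfC, List.zip, List.tail, List.zipWith, List.map] at IH ⊢
      rw [signE_eq_sgn]
      exact congrArg _ IH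

lemma iswavy_main (s : List Char) :
    (if s.length ≤ 2 then true
     else iswavyGo s (PySem.List.slice s (some 1) (some ((s.length : Int) - 1))) 0
            (charInt ((PySem.List.pyGet? s 0).getD ' ')
              - charInt ((PySem.List.pyGet? s 1).getD ' ')))
  = (if s.length ≤ 2 then true
     else bcheck (((s.map charInt).zip (s.map charInt).tail).map (fun p => signE p.1 p.2))) := by
  by_cases hlen : s.length ≤ 2
  · simp [hlen]
  · simp only [if_neg hlen]
    push_neg at hlen
    obtain ⟨a, b, s2, rfl⟩ : ∃ a b t, s = a :: b :: t := by
      match s, hlen with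
      | a :: b :: t, _ => exact ⟨a, b, t, rfl⟩
    have hs2 : s2 ≠ [] := by
      intro h; rw [h] at hlen; simp at hlen
    have hslice : PySem.List.slice (a :: b :: s2) (some 1)
        (some (((a :: b :: s2).length : Int) - 1))
        = (b :: s2).dropLast := by
      have h1 : (((a :: b :: s2).length : Int) - 1) = (((a :: b :: s2).length - 1 : Nat) : Int) := by
        omega
      have h2 : ((1 : Int)) = ((1 : Nat) : Int) := by norm_num
      rw [h1, h2, PySem.List.slice_natCast]
      simp only [List.drop_one, List.tail_cons]
      rw [List.dropLast_eq_take]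
      congr 1
    have hlast : (b :: s2).dropLast ++ [(b :: s2).getLast (by simp)] = b :: s2 :=
      List.dropLast_append_getLast (by simp)
    have hgo := go_eq (a :: b :: s2) ((b :: s2).dropLast) 0
      ((b :: s2).getLast (by simp))
      (charInt ((PySem.List.pyGet? (a :: b :: s2) 0).getD ' ')
        - charInt ((PySem.List.pyGet? (a :: b :: s2) 1).getD ' '))
      (by rw [hlast]; simp)
    rw [hslice]
    norm_num at hgo
    have hget0 : (PySem.List.pyGet? (a :: b :: s2) 0).getD ' ' = a := by
      simp [PySem.List.pyGet?_zero_cons]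
    have hget1 : (PySem.List.pyGet? (a :: b :: s2) 1).getD ' ' = b := by
      rw [show ((1 : Int)) = ((1 : Nat) : Int) from rfl, PySem.List.pyGet?_natCast]
      simp
    rw [hget0, hget1, hgo, hlast, signs_eq, diffs_cons]
    have hne : diffsOfC (b :: s2) ≠ [] := by
      cases s2 with
      | nil => exact absurd rfl hs2
      | cons c t => simp [diffsOfC]
    exact core (diffsOfC (b :: s2)) (charInt a - charInt b) hne

theorem iswavy_eq (number : Int) : iswavy number = iswavy_alt number := by
  unfold iswavy iswavy_alt
  exact iswavy_main (PySem.Int.toChars number)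

-- ===== VERDICT (by name: the statement is the Claim_ definition above) =====
theorem iswavy_spec : Claim_equal_iswavy := by
  intro number _ _
  unfold Spec_iswavy
  exact iswavy_eq number
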